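-- pv_equiv track=rewrite | github.com/dan-sazonov/olymp-playground | ЕГЭ/22/10323.py | f
-- ===== SOURCE A (Python) =====
-- def f(x):
--     a = 0
--     b = 0
--     while x > 0:
--         a = a + 1
--         if x % 2 == 0:
--             b += x % 10
--         x = x // 10
--     return a, b
-- ===== SOURCE B (Python) =====
-- def f(x):
--     if x <= 0:
--         return 0, 0
--     digits = [int(c) for c in str(x)]
--     return len(digits), sum(d for d in digits if d % 2 == 0)
-- ===== Notes on version B (the rewrite author's own statement) =====
-- stated objective: idiomatic
-- what changed: Replaces A's single right-to-left arithmetic digit-stripping while-loop (carrying two running accumulators) by converting the positive integer to its decimal string once and doing two separate aggregations (len and a filtered sum) over the digit list.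
import Mathlib
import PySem

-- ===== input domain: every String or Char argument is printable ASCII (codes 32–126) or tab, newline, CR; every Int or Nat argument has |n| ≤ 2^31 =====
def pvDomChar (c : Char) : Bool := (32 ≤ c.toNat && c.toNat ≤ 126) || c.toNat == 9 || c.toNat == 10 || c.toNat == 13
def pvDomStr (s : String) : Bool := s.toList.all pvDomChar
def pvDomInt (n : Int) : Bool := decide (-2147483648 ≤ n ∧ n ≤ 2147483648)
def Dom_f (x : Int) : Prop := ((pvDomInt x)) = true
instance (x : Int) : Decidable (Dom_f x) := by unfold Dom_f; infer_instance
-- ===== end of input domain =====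

-- B replaces A's arithmetic digit-stripping while-loop by a decimal-string conversion
-- followed by two separate aggregations (length, filtered sum) over the digit list.

-- ===== PORT A =====
-- A's while loop, carrying the two accumulators a and b.
def fLoop (x a b : Int) : Int × Int :=
  if _h : x > 0 then
    fLoop (PySem.Int.floordiv x 10) (a + 1)
      (if PySem.Int.mod x 2 == 0 then b + PySem.Int.mod x 10 else b)
  else (a, b)
termination_by x.toNat
decreasing_by simp only [PySem.Int.floordiv]; rw [Int.fdiv_eq_ediv]; simp; omega

def f (x : Int) : Int × Int := fLoop x 0 0

-- ===== PORT B =====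
def f_alt (x : Int) : Int × Int :=
  if x ≤ 0 then (0, 0)
  else
    let digits := (PySem.Int.toStr x).toList.map (fun c => ((c.toNat : Int) - 48))
    ((digits.length : Int), (digits.filter (fun d => d % 2 == 0)).sum)

-- ===== PRECONDITION & SPEC =====
def Spec_f (x : Int) (out : Int × Int) : Prop := out = f_alt x
instance (x : Int) (out : Int × Int) : Decidable (Spec_f x out) := by unfold Spec_f; infer_instance

-- ===== CLAIM (what is proved, stated in full; the proofs are below) =====
def Claim_equal_f : Prop := ∀ (x : Int), Dom_f x → Spec_f x (f x)

-- ===== LEMMAS AND PROOFS =====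

lemma toDigitsCore_eq_digits (f : Nat) : ∀ (n : Nat) (acc : List Char), n ≠ 0 → n ≤ f →
    Nat.toDigitsCore 10 f n acc = ((Nat.digits 10 n).map Nat.digitChar).reverse ++ acc := by
  induction f with
  | zero => intro n acc hn hle; omega
  | succ f ih =>
    intro n acc hn hle
    rw [Nat.toDigitsCore]
    by_cases h : n / 10 = 0
    · have hlt : n < 10 := by omega
      rw [Nat.digits_def' (by norm_num) (Nat.pos_of_ne_zero hn)]
      simp [h, Nat.mod_eq_of_lt hlt]
    · have h10 : n / 10 ≤ f := by
        have := Nat.div_lt_self (Nat.pos_of_ne_zero hn) (by norm_num : 1 < 10)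
        omega
      simp only [h]
      rw [ih (n / 10) _ h h10,
        Nat.digits_def' (by norm_num : 1 < 10) (Nat.pos_of_ne_zero hn)]
      simp

lemma toDigits_eq_digits (n : Nat) (hn : 0 < n) :
    Nat.toDigits 10 n = ((Nat.digits 10 n).map Nat.digitChar).reverse := by
  rw [Nat.toDigits]
  simpa using toDigitsCore_eq_digits (n + 1) n [] (by omega) (by omega)

lemma digitChar_toNat (d : Nat) (hd : d < 10) : (Nat.digitChar d).toNat = 48 + d := by
  interval_cases d <;> decide

-- the even-digit sum of n, as A accumulates it
def evenSum (n : Nat) : Nat := ((Nat.digits 10 n).filter (fun d => d % 2 == 0)).sum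

lemma fLoop_eq (n : Nat) : ∀ (a b : Int),
    fLoop (n : Int) a b = (a + ((Nat.digits 10 n).length : Int), b + (evenSum n : Int)) := by
  induction n using Nat.strong_induction_on with
  | _ n ih =>
    intro a b
    by_cases hn : n = 0
    · subst hn
      rw [fLoop.eq_def]
      simp [evenSum]
    · have hpos : 0 < n := Nat.pos_of_ne_zero hn
      rw [fLoop.eq_def]
      have hgt : (n : Int) > 0 := by exact_mod_cast hpos
      rw [dif_pos hgt]
      have hfd : PySem.Int.floordiv (n : Int) 10 = ((n / 10 : Nat) : Int) := by
        simp only [PySem.Int.floordiv]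
        rw [Int.fdiv_eq_ediv, if_pos (Or.inl (by norm_num : (0:Int) ≤ 10))]; omega
      have hm2 : PySem.Int.mod (n : Int) 2 = ((n % 2 : Nat) : Int) := by
        simp only [PySem.Int.mod]
        rw [Int.fmod_eq_emod]; omega
      have hm10 : PySem.Int.mod (n : Int) 10 = ((n % 10 : Nat) : Int) := by
        simp only [PySem.Int.mod]
        rw [Int.fmod_eq_emod]; omega
      rw [hfd, hm2, hm10, ih (n / 10) (Nat.div_lt_self hpos (by norm_num))]
      unfold evenSum
      rw [Nat.digits_def' (by norm_num : 1 < 10) hpos]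
      have heq : ((n % 2 : Nat) : Int) == 0 ↔ n % 10 % 2 == 0 := by
        simp [beq_iff_eq]; omega
      rw [List.filter_cons]
      by_cases hpar : n % 10 % 2 == 0
      · rw [if_pos hpar, if_pos (heq.mpr hpar)]
        simp only [List.length_cons, List.sum_cons, Prod.mk.injEq]
        refine ⟨?_, ?_⟩ <;> (push_cast; try ring)
      · rw [if_neg hpar, if_neg (fun h => hpar (heq.mp h))]
        simp only [List.length_cons, Prod.mk.injEq]
        refine ⟨?_, ?_⟩ <;> (push_cast; try ring)

lemma f_alt_pos (x : Int) (hx : 0 < x) :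
    f_alt x = (((Nat.digits 10 x.toNat).length : Int), (evenSum x.toNat : Int)) := by
  unfold f_alt
  rw [if_neg (by omega)]
  have hchars : (PySem.Int.toStr x).toList = ((Nat.digits 10 x.toNat).map Nat.digitChar).reverse := by
    rw [PySem.Int.toList_toStr, PySem.Int.toChars, if_neg (by omega),
      toDigits_eq_digits x.toNat (by omega)]
  simp only [hchars, List.map_reverse, List.map_map]
  have hmap : (Nat.digits 10 x.toNat).map ((fun c => ((c.toNat : Int) - 48)) ∘ Nat.digitChar)
      = (Nat.digits 10 x.toNat).map (fun d : Nat => (d : Int)) := by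
    apply List.map_congr_left
    intro d hd
    have : d < 10 := Nat.digits_lt_base (by norm_num) hd
    simp [Function.comp, digitChar_toNat d this]
  rw [hmap]
  simp only [Prod.mk.injEq]
  refine ⟨?_, ?_⟩
  · simp
  · rw [List.filter_reverse, List.sum_reverse]
    have hfm : ((Nat.digits 10 x.toNat).map (fun d : Nat => (d : Int))).filter (fun d => d % 2 == 0)
        = ((Nat.digits 10 x.toNat).filter (fun d => d % 2 == 0)).map (fun d : Nat => (d : Int)) := by
      rw [List.filter_map]
      congr 1
      apply List.filter_congr
      intro d _
      simp
      omega
    rw [hfm, evenSum]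
    simp [Nat.cast_list_sum]

-- ===== VERDICT (by name: the statement is the Claim_ definition above) =====
theorem f_spec : Claim_equal_f := by
  intro x _
  unfold Spec_f f
  by_cases hx : 0 < x
  · have : x = (x.toNat : Int) := by omega
    rw [this, fLoop_eq x.toNat 0 0, ← this, f_alt_pos x hx]
    simp
  · rw [fLoop.eq_def, dif_neg (by omega)]
    unfold f_alt
    rw [if_pos (by omega)]
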